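-- pv_equiv track=rewrite | github.com/TerryLos/Thesis | thesis/ASLR-Dedu/ASLR.py | alike
-- ===== SOURCE A (Python) =====
-- def alike(s1,s2):
-- 	lenS1 = len(s1)
-- 	lenS2 = len(s2)
--
-- 	lettersPre = 0
-- 	lettersSuf = 0
--
-- 	stopPre = False
-- 	stopSuf = False
-- 	#Prefix
-- 	for i in range(lenS1):
-- 		if i >= lenS2 or (stopSuf and stopPre):
-- 			break
-- 		if s1[lenS1-i-1] == s2[lenS2-i-1] and not stopSuf:
-- 			lettersSuf +=1
-- 		else:
-- 			stopSuf = True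
--
-- 		if s1[i]==s2[i] and not stopPre:
-- 			lettersPre +=1
-- 		else:
-- 			stopPre = True
--
-- 	if lettersPre > lettersSuf :
-- 		return lettersPre
-- 	else :
-- 		return lettersSuf
-- ===== SOURCE B (Python) =====
-- def alike(s1, s2):
--     m = min(len(s1), len(s2))
--
--     def longest(eq):
--         # largest k in [0, m] with eq(k); eq is monotone (true on a prefix of 0..m)
--         lo, hi = 0, m
--         while lo < hi:
--             mid = (lo + hi + 1) // 2
--             if eq(mid):
--                 lo = mid
--             else:
--                 hi = mid - 1
--         return lo
--
--     pre = longest(lambda k: s1[:k] == s2[:k])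
--     suf = longest(lambda k: s1[len(s1)-k:] == s2[len(s2)-k:])
--     return max(pre, suf)
-- ===== Notes on version B (the rewrite author's own statement) =====
-- stated objective: alternative
-- what changed: Replaced A's single interleaved index loop with stop-flags by two binary searches: each searches for the largest k such that the k-character prefix slices (resp. suffix slices) of the two strings are equal, exploiting that slice equality is monotone in k, and returns the max of the two.
import Mathlib
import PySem

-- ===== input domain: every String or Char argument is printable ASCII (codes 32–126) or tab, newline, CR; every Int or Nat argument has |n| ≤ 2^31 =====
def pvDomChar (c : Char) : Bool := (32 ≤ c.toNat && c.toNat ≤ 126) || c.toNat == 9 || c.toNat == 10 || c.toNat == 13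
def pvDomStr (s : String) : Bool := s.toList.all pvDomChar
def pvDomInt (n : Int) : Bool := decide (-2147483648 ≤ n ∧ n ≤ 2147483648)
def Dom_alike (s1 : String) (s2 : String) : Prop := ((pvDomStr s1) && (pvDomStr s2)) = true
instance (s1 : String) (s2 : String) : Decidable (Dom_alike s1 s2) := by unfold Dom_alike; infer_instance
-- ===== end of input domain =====

-- B replaces A's interleaved character scan with two binary searches for the largest k whose
-- k-character prefix (resp. suffix) slices of the two strings are equal; objective: alternative.

-- ===== PORT A =====
-- A's `for i in range(lenS1)` loop with the two breaks and the two stop flags; fuel = remaining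
-- iterations (fuel = lenS1 - i). Indices are read with List.getD ' ' — in every reachable read
-- i < lenS1 and i < lenS2, so the index is in range and the default is never used (exact).
def alikeLoop (l1 l2 : List Char) (n1 n2 : Nat) :
    Nat → Nat → Int × Int × Bool × Bool → Int × Int × Bool × Bool
  | 0, _, st => st
  | fuel + 1, i, (pre, suf, sp, ss) =>
    if n2 ≤ i ∨ (ss = true ∧ sp = true) then (pre, suf, sp, ss)  -- break
    else
      let (suf', ss') :=
        if l1.getD (n1 - i - 1) ' ' = l2.getD (n2 - i - 1) ' ' ∧ ss = false
        then (suf + 1, ss) else (suf, true)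
      let (pre', sp') :=
        if l1.getD i ' ' = l2.getD i ' ' ∧ sp = false
        then (pre + 1, sp) else (pre, true)
      alikeLoop l1 l2 n1 n2 fuel (i + 1) (pre', suf', sp', ss')

def alike (s1 : String) (s2 : String) : Int :=
  let l1 := s1.toList
  let l2 := s2.toList
  match alikeLoop l1 l2 l1.length l2.length l1.length 0 (0, 0, false, false) with
  | (lettersPre, lettersSuf, _, _) =>
    if lettersPre > lettersSuf then lettersPre else lettersSuf

-- ===== PORT B =====
-- B's `longest(eq)` while-loop: binary search for the largest k in [lo, hi] with eq k;
-- fuel bounds the iteration count (hi - lo shrinks each step, so fuel = m suffices).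
def bsLongest (eq : Nat → Bool) : Nat → Nat → Nat → Nat
  | 0, lo, _ => lo
  | fuel + 1, lo, hi =>
    if lo < hi then
      let mid := (lo + hi + 1) / 2
      if eq mid then bsLongest eq fuel mid hi
      else bsLongest eq fuel lo (mid - 1)
    else lo

-- s1[:k] is List.take k, s1[len(s1)-k:] is List.drop (len - k) (k ≤ len here, so exact).
def alike_alt (s1 : String) (s2 : String) : Int :=
  let l1 := s1.toList
  let l2 := s2.toList
  let m := min l1.length l2.length
  let pre := bsLongest (fun k => l1.take k == l2.take k) m 0 m
  let suf := bsLongest (fun k => l1.drop (l1.length - k) == l2.drop (l2.length - k)) m 0 m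
  ((max pre suf : Nat) : Int)

-- ===== PRECONDITION & SPEC =====
def Spec_alike (s1 : String) (s2 : String) (out : Int) : Prop := out = alike_alt s1 s2
instance (s1 : String) (s2 : String) (out : Int) : Decidable (Spec_alike s1 s2 out) := by unfold Spec_alike; infer_instance

-- ===== CLAIM =====
def Claim_equal_alike : Prop := ∀ (s1 : String) (s2 : String), Dom_alike s1 s2 → Spec_alike s1 s2 (alike s1 s2)

-- ===== LEMMAS AND PROOFS =====

-- common-prefix length of a pair list (proof-side characterization of both programs)
def cplN : List (Char × Char) → Nat
  | [] => 0
  | (a, b) :: t => if a = b then cplN t + 1 else 0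

theorem cplN_le (t : List (Char × Char)) : cplN t ≤ t.length := by
  induction t with
  | nil => simp [cplN]
  | cons p t ih => obtain ⟨a, b⟩ := p; by_cases h : a = b <;> simp [cplN, h] <;> omega

theorem take_eq_iff (l1 : List Char) : ∀ (l2 : List Char) (k : Nat),
    k ≤ min l1.length l2.length →
    (l1.take k = l2.take k ↔ k ≤ cplN (l1.zip l2)) := by
  induction l1 with
  | nil => intro l2 k hk; simp at hk; simp [hk]
  | cons a t1 ih =>
    intro l2 k hk
    cases l2 with
    | nil => simp at hk; simp [hk]
    | cons b t2 =>
      cases k with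
      | zero => simp
      | succ k =>
        simp at hk
        by_cases h : a = b
        · simp [List.take_succ_cons, cplN, h, ih t2 k (by omega)]
        · simp [List.take_succ_cons, cplN, h]

theorem alikeLoop_eq (l1 l2 : List Char) :
    ∀ (fuel i : Nat), fuel = l1.length - i →
    ∀ (pre suf : Int) (sp ss : Bool),
    alikeLoop l1 l2 l1.length l2.length fuel i (pre, suf, sp, ss) =
      ((if sp then pre else pre + (cplN ((l1.zip l2).drop i) : Int)),
       (if ss then suf else suf + (cplN ((l1.reverse.zip l2.reverse).drop i) : Int)),
       (alikeLoop l1 l2 l1.length l2.length fuel i (pre, suf, sp, ss)).2.2) := by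
  intro fuel
  induction fuel with
  | zero =>
    intro i hf pre suf sp ss
    have h1 : (l1.zip l2).drop i = [] := by
      apply List.drop_eq_nil_of_le; simp; omega
    have h2 : (l1.reverse.zip l2.reverse).drop i = [] := by
      apply List.drop_eq_nil_of_le; simp; omega
    simp only [alikeLoop, h1, h2, cplN]
    refine Prod.ext ?_ (Prod.ext ?_ rfl) <;> simp
  | succ fuel ih =>
    intro i hf pre suf sp ss
    have hi1 : i < l1.length := by omega
    by_cases hbr : l2.length ≤ i ∨ (ss = true ∧ sp = true)
    · rcases hbr with h2 | ⟨hss, hsp⟩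
      · have h1 : (l1.zip l2).drop i = [] := by
          apply List.drop_eq_nil_of_le; simp; omega
        have h2' : (l1.reverse.zip l2.reverse).drop i = [] := by
          apply List.drop_eq_nil_of_le; simp; omega
        have hb : alikeLoop l1 l2 l1.length l2.length (fuel + 1) i (pre, suf, sp, ss) =
            (pre, suf, sp, ss) := by simp [alikeLoop, h2]
        rw [hb, h1, h2']
        cases sp <;> cases ss <;> simp [cplN]
      · subst hss; subst hsp
        have hb : alikeLoop l1 l2 l1.length l2.length (fuel + 1) i (pre, suf, true, true) =
            (pre, suf, true, true) := by simp [alikeLoop]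
        rw [hb]
        simp
    · have hi2 : i < l2.length := by omega
      have hzl : i < (l1.zip l2).length := by simp; omega
      have hwl : i < (l1.reverse.zip l2.reverse).length := by simp; omega
      have hz : (l1.zip l2).drop i = (l1[i], l2[i]) :: (l1.zip l2).drop (i + 1) := by
        rw [← List.getElem_cons_drop hzl]; simp
      have hw : (l1.reverse.zip l2.reverse).drop i =
          (l1[l1.length - 1 - i]'(by omega), l2[l2.length - 1 - i]'(by omega)) ::
            (l1.reverse.zip l2.reverse).drop (i + 1) := by
        rw [← List.getElem_cons_drop hwl]
        simp [List.getElem_zip, List.getElem_reverse]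
      have hg1 : l1.getD (l1.length - i - 1) ' ' = l1[l1.length - 1 - i]'(by omega) := by
        rw [List.getD_eq_getElem l1 ' ' (by omega)]
        simp only [show l1.length - i - 1 = l1.length - 1 - i from by omega]
      have hg2 : l2.getD (l2.length - i - 1) ' ' = l2[l2.length - 1 - i]'(by omega) := by
        rw [List.getD_eq_getElem l2 ' ' (by omega)]
        simp only [show l2.length - i - 1 = l2.length - 1 - i from by omega]
      have hg3 : l1.getD i ' ' = l1[i] := List.getD_eq_getElem l1 ' ' hi1
      have hg4 : l2.getD i ' ' = l2[i] := List.getD_eq_getElem l2 ' ' hi2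
      have hstep : ∀ st, alikeLoop l1 l2 l1.length l2.length (fuel + 1) i st =
          (match st with
           | (pre, suf, sp, ss) =>
             if l2.length ≤ i ∨ (ss = true ∧ sp = true) then (pre, suf, sp, ss)
             else
               let (suf', ss') :=
                 if l1.getD (l1.length - i - 1) ' ' = l2.getD (l2.length - i - 1) ' ' ∧ ss = false
                 then (suf + 1, ss) else (suf, true)
               let (pre', sp') :=
                 if l1.getD i ' ' = l2.getD i ' ' ∧ sp = false
                 then (pre + 1, sp) else (pre, true)
               alikeLoop l1 l2 l1.length l2.length fuel (i + 1) (pre', suf', sp', ss')) := by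
        intro st; rfl
      rw [hstep]
      simp only [hbr, hg1, hg2, hg3, hg4, hz, hw, cplN]
      rw [ih (i + 1) (by omega)]
      cases sp <;> cases ss <;>
        by_cases h1 : l1[i] = l2[i] <;>
        by_cases h2 : l1[l1.length - 1 - i]'(by omega) = l2[l2.length - 1 - i]'(by omega) <;>
        (try simp [h1, h2]) <;> (try push_cast) <;>
        (try constructor) <;> ring1

-- binary search correctness: with a predicate true exactly on [lo, c] ∩ [lo, hi], it returns c
theorem bsLongest_eq (eq : Nat → Bool) (c : Nat) :
    ∀ (fuel lo hi : Nat), lo ≤ c → c ≤ hi → hi - lo ≤ fuel →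
    (∀ k, lo ≤ k → k ≤ hi → (eq k = true ↔ k ≤ c)) →
    bsLongest eq fuel lo hi = c := by
  intro fuel
  induction fuel with
  | zero =>
    intro lo hi h1 h2 h3 _
    simp only [bsLongest]
    omega
  | succ fuel ih =>
    intro lo hi h1 h2 h3 hpred
    by_cases hlt : lo < hi
    · have hmid1 : lo < (lo + hi + 1) / 2 := by omega
      have hmid2 : (lo + hi + 1) / 2 ≤ hi := by omega
      simp only [bsLongest, if_pos hlt]
      by_cases he : eq ((lo + hi + 1) / 2) = true
      · have hc : (lo + hi + 1) / 2 ≤ c := (hpred _ (by omega) hmid2).mp he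
        rw [if_pos he]
        exact ih _ _ hc h2 (by omega) (fun k hk1 hk2 => hpred k (by omega) hk2)
      · have hc : ¬ ((lo + hi + 1) / 2 ≤ c) := fun h => he ((hpred _ (by omega) hmid2).mpr h)
        rw [if_neg he]
        exact ih _ _ h1 (by omega) (by omega) (fun k hk1 hk2 => hpred k hk1 (by omega))
    · simp only [bsLongest, if_neg hlt]
      omega

theorem drop_eq_rev_take (l : List Char) (k : Nat) :
    l.drop (l.length - k) = (l.reverse.take k).reverse := by
  rw [List.take_reverse, List.reverse_reverse]

theorem alike_spec : Claim_equal_alike := by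
  intro s1 s2 _
  unfold Spec_alike alike alike_alt
  simp only
  rw [alikeLoop_eq s1.toList s2.toList s1.toList.length 0 (by omega) 0 0 false false]
  set l1 := s1.toList
  set l2 := s2.toList
  set m := min l1.length l2.length with hm
  have hpre : bsLongest (fun k => l1.take k == l2.take k) m 0 m = cplN (l1.zip l2) := by
    apply bsLongest_eq _ _ _ _ _ (by omega)
    · have := cplN_le (l1.zip l2); simp at this; omega
    · omega
    · intro k _ hk2
      simp only [beq_iff_eq]
      exact take_eq_iff l1 l2 k (by omega)
  have hsuf : bsLongest (fun k => l1.drop (l1.length - k) == l2.drop (l2.length - k)) m 0 m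
      = cplN (l1.reverse.zip l2.reverse) := by
    apply bsLongest_eq _ _ _ _ _ (by omega)
    · have := cplN_le (l1.reverse.zip l2.reverse); simp at this; omega
    · omega
    · intro k _ hk2
      simp only [beq_iff_eq, drop_eq_rev_take]
      rw [List.reverse_inj]
      exact take_eq_iff l1.reverse l2.reverse k (by simp; omega)
  rw [hpre, hsuf]
  simp only [List.drop_zero, if_neg Bool.false_ne_true, zero_add]
  split <;> omega
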